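-- pv_equiv track=rewrite | github.com/anaellop150-sketch/3v700 | src/services/visual_proofs_generator.py | _prioritize_concepts
-- ===== SOURCE A (Python) =====
-- from typing import Dict, List, Any, Optional
--
-- def _prioritize_concepts(concepts: List[str], avatar_data: Dict[str, Any]) -> List[str]:
--     """Prioriza conceitos baseado no avatar"""
--
--     # Dores têm prioridade alta
--     dores = avatar_data.get('dores_viscerais', [])
--     desejos = avatar_data.get('desejos_secretos', [])
--
--     prioritized = []
--
--     # Adiciona dores primeiro
--     for concept in concepts:
--         if any(concept.lower() in dor.lower() for dor in dores):
--             prioritized.append(concept)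
--
--     # Adiciona desejos
--     for concept in concepts:
--         if concept not in prioritized and any(concept.lower() in desejo.lower() for desejo in desejos):
--             prioritized.append(concept)
--
--     # Adiciona conceitos restantes
--     for concept in concepts:
--         if concept not in prioritized:
--             prioritized.append(concept)
--
--     return prioritized
-- ===== SOURCE B (Python) =====
-- from typing import Dict, List, Any
--
-- def _prioritize_concepts(concepts: List[str], avatar_data: Dict[str, Any]) -> List[str]:
--     dores = [d.lower() for d in avatar_data.get('dores_viscerais', [])]
--     desejos = [d.lower() for d in avatar_data.get('desejos_secretos', [])]
--
--     pains, desires, rest = [], [], []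
--     seen = set()
--     for concept in concepts:
--         low = concept.lower()
--         if any(low in dor for dor in dores):
--             pains.append(concept)
--         elif concept not in seen:
--             seen.add(concept)
--             (desires if any(low in desejo for desejo in desejos) else rest).append(concept)
--     return pains + desires + rest
-- ===== Notes on version B (the rewrite author's own statement) =====
-- stated objective: faster
-- what changed: Replaces A's three full scans over concepts (each with an O(n) membership test against the growing result list) by a single pass that lowercases each concept once, pre-lowercases the avatar's pain/desire lists, and dispatches each concept into one of three buckets (pains undeduplicated, desires/rest deduplicated via a hash seen-set), returning pains + desires + rest.
import Mathlib
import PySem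

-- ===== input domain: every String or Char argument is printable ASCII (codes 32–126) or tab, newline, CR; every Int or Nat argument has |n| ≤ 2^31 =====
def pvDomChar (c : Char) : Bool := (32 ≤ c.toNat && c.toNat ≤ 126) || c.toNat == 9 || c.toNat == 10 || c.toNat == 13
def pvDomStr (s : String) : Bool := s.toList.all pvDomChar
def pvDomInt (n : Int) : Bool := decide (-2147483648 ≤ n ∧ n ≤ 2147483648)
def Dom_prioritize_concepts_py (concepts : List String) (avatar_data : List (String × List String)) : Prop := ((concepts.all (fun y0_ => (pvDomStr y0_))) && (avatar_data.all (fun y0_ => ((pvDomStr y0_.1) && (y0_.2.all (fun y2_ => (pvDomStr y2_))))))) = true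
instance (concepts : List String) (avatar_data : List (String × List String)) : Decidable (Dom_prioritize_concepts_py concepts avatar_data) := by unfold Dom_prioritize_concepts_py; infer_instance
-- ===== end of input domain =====

-- B makes one pass over concepts (lowercasing each concept once and pre-lowercasing the avatar lists),
-- dispatching into three buckets with a seen-set, instead of A's three full scans with list membership; objective: alternative decomposition.


-- ===== PORT A =====
def prioritize_concepts_py (concepts : List String) (avatar_data : List (String × List String)) : List String :=
  let dores := PySem.Dict.getD (PySem.Dict.mk avatar_data) "dores_viscerais" []
  let desejos := PySem.Dict.getD (PySem.Dict.mk avatar_data) "desejos_secretos" []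
  -- for concept in concepts: if any(concept.lower() in dor.lower() for dor in dores): prioritized.append(concept)
  let prioritized := concepts.foldl (fun acc c =>
    if dores.any (fun dor => PySem.Str.isIn (PySem.Str.lower c) (PySem.Str.lower dor)) then acc ++ [c] else acc) []
  -- for concept in concepts: if concept not in prioritized and any(... desejos ...): prioritized.append(concept)
  let prioritized := concepts.foldl (fun acc c =>
    if !acc.contains c && desejos.any (fun de => PySem.Str.isIn (PySem.Str.lower c) (PySem.Str.lower de)) then acc ++ [c] else acc) prioritized
  -- for concept in concepts: if concept not in prioritized: prioritized.append(concept)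
  concepts.foldl (fun acc c => if !acc.contains c then acc ++ [c] else acc) prioritized

-- ===== PORT B =====
def prioritize_concepts_py_alt (concepts : List String) (avatar_data : List (String × List String)) : List String :=
  let dores := (PySem.Dict.getD (PySem.Dict.mk avatar_data) "dores_viscerais" []).map PySem.Str.lower
  let desejos := (PySem.Dict.getD (PySem.Dict.mk avatar_data) "desejos_secretos" []).map PySem.Str.lower
  let st := concepts.foldl (fun (s : List String × List String × List String × PySem.Set String) c =>
    match s with
    | (pains, desires, rest, seen) =>
      let low := PySem.Str.lower c
      if dores.any (fun dor => PySem.Str.isIn low dor) then (pains ++ [c], desires, rest, seen)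
      else if !(PySem.Set.contains seen c) then
        let seen := PySem.Set.add seen c
        if desejos.any (fun de => PySem.Str.isIn low de) then (pains, desires ++ [c], rest, seen)
        else (pains, desires, rest ++ [c], seen)
      else (pains, desires, rest, seen)) ([], [], [], PySem.Set.empty)
  st.1 ++ st.2.1 ++ st.2.2.1

-- ===== PRECONDITION & SPEC =====
def Spec_prioritize_concepts_py (concepts : List String) (avatar_data : List (String × List String)) (out : List String) : Prop := out = prioritize_concepts_py_alt concepts avatar_data
instance (concepts : List String) (avatar_data : List (String × List String)) (out : List String) : Decidable (Spec_prioritize_concepts_py concepts avatar_data out) := by unfold Spec_prioritize_concepts_py; infer_instance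

-- ===== CLAIM (what is proved, stated in full; the proofs are below) =====
def Claim_equal_prioritize_concepts_py : Prop := ∀ (concepts : List String) (avatar_data : List (String × List String)), Dom_prioritize_concepts_py concepts avatar_data → Spec_prioritize_concepts_py concepts avatar_data (prioritize_concepts_py concepts avatar_data)

-- ===== LEMMAS AND PROOFS =====

-- the deduplicating folds of A's passes 2 and 3, restricted past the predicates already handled
def pvG2 (pain des : String → Bool) (a : List String) (c : String) : List String :=
  if !pain c && (!a.contains c && des c) then a ++ [c] else a
def pvG3 (pain des : String → Bool) (a : List String) (c : String) : List String :=
  if !(pain c || des c) && !a.contains c then a ++ [c] else a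
-- B's one-pass dispatch step, abstracted over the two predicates
def pvStepB (pain des : String → Bool) (s : List String × List String × List String × PySem.Set String) (c : String) : List String × List String × List String × PySem.Set String :=
  match s with
  | (pains, desires, rest, seen) =>
    if pain c then (pains ++ [c], desires, rest, seen)
    else if !(PySem.Set.contains seen c) then
      if des c then (pains, desires ++ [c], rest, PySem.Set.add seen c)
      else (pains, desires, rest ++ [c], PySem.Set.add seen c)
    else (pains, desires, rest, seen)

theorem pv_split2 (pain des : String → Bool) :
    ∀ (xs : List String) (P D : List String), (∀ c ∈ xs, P.contains c = pain c) →
    xs.foldl (fun a c => if !a.contains c && des c then a ++ [c] else a) (P ++ D)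
      = P ++ xs.foldl (pvG2 pain des) D := by
  intro xs
  induction xs with
  | nil => intro P D _; rfl
  | cons c t ih =>
    intro P D h
    have hc : P.contains c = pain c := h c (by simp)
    simp only [List.foldl_cons, pvG2, List.contains_append, hc]
    cases hp : pain c with
    | true => simpa using ih P D (fun x hx => h x (by simp [hx]))
    | false =>
      cases hd : D.contains c with
      | true => simpa using ih P D (fun x hx => h x (by simp [hx]))
      | false =>
        cases hdes : des c with
        | false => simpa using ih P D (fun x hx => h x (by simp [hx]))
        | true =>
          simp only [Bool.false_or, Bool.not_false]
          have := ih P (D ++ [c]) (fun x hx => h x (by simp [hx]))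
          simpa [pvG2] using this

theorem pv_split3 (pain des : String → Bool) :
    ∀ (xs : List String) (Q R : List String), (∀ c ∈ xs, Q.contains c = (pain c || des c)) →
    xs.foldl (fun a c => if !a.contains c then a ++ [c] else a) (Q ++ R)
      = Q ++ xs.foldl (pvG3 pain des) R := by
  intro xs
  induction xs with
  | nil => intro Q R _; rfl
  | cons c t ih =>
    intro Q R h
    have hc : Q.contains c = (pain c || des c) := h c (by simp)
    simp only [List.foldl_cons, pvG3, List.contains_append, hc]
    cases hp : (pain c || des c) with
    | true => simpa using ih Q R (fun x hx => h x (by simp [hx]))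
    | false =>
      cases hr : R.contains c with
      | true => simpa using ih Q R (fun x hx => h x (by simp [hx]))
      | false =>
        simp only [Bool.false_or, Bool.not_false, Bool.and_true]
        have := ih Q (R ++ [c]) (fun x hx => h x (by simp [hx]))
        simpa [pvG3, hp] using this

theorem pv_g2_contains (pain des : String → Bool) :
    ∀ (xs : List String) (D : List String) (c : String),
    (xs.foldl (pvG2 pain des) D).contains c
      = (D.contains c || (xs.contains c && !pain c && des c)) := by
  intro xs
  induction xs with
  | nil => simp
  | cons x t ih =>
    intro D c
    simp only [List.foldl_cons, pvG2]
    by_cases hcx : c = x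
    · subst hcx
      cases hcond : (!pain c && (!D.contains c && des c)) with
      | true =>
        simp only [hcond, if_true]
        rw [ih]
        revert hcond
        cases pain c <;> cases des c <;> cases D.contains c <;> cases t.contains c <;> simp
      | false =>
        simp only [hcond, Bool.false_eq_true, ↓reduceIte]
        rw [ih]
        revert hcond
        cases pain c <;> cases des c <;> cases D.contains c <;> cases t.contains c <;> simp
    · have hne : (c == x) = false := by simp [hcx]
      cases hcond : (!pain x && (!D.contains x && des x)) with
      | true =>
        simp only [hcond, if_true]
        rw [ih]
        simp [hne, hcx]
      | false =>
        simp only [hcond, Bool.false_eq_true, ↓reduceIte]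
        rw [ih]
        simp [hne, hcx]

theorem pv_filter_contains (pain : String → Bool) (xs : List String) :
    ∀ c ∈ xs, (xs.filter pain).contains c = pain c := by
  intro c hc
  cases hp : pain c with
  | true => simp [List.contains_iff_mem, List.mem_filter, hc, hp]
  | false => simp [List.contains_iff_mem, List.mem_filter, hp]

-- invariant of B's single pass: pains collects pain-matches undeduplicated, desires/rest are the
-- seen-deduplicated buckets, and seen's membership is exactly desires ∪ rest
theorem pv_Binv (pain des : String → Bool) :
    ∀ (xs : List String) (p d r seen : List String),
    (∀ c : String, seen.contains c = (d.contains c || r.contains c)) →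
    (∀ c ∈ d, pain c = false ∧ des c = true) →
    (∀ c ∈ r, pain c = false ∧ des c = false) →
    (xs.foldl (pvStepB pain des) (p, d, r, seen)).1
      ++ (xs.foldl (pvStepB pain des) (p, d, r, seen)).2.1
      ++ (xs.foldl (pvStepB pain des) (p, d, r, seen)).2.2.1
      = (p ++ xs.filter pain) ++ (xs.foldl (pvG2 pain des) d ++ xs.foldl (pvG3 pain des) r) := by
  intro xs
  induction xs with
  | nil => intro p d r seen _ _ _; simp
  | cons c t ih =>
    intro p d r seen hseen hd hr
    simp only [List.foldl_cons, List.filter_cons]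
    cases hp : pain c with
    | true =>
      have hstep : pvStepB pain des (p, d, r, seen) c = (p ++ [c], d, r, seen) := by
        simp [pvStepB, hp]
      have e2 : pvG2 pain des d c = d := by simp [pvG2, hp]
      have e3 : pvG3 pain des r c = r := by simp [pvG3, hp]
      rw [hstep, e2, e3, ih (p ++ [c]) d r seen hseen hd hr]
      simp [hp]
    | false =>
      cases hs : PySem.Set.contains seen c with
      | true =>
        have hs' : List.contains seen c = true := hs
        have hsm : c ∈ seen := List.contains_iff_mem.mp hs'
        have hmem : (d.contains c || r.contains c) = true := by rw [← hseen]; exact hs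
        have hstep : pvStepB pain des (p, d, r, seen) c = (p, d, r, seen) := by
          simp [pvStepB, hp, hsm]
        have e2 : pvG2 pain des d c = d := by
          cases hdc : d.contains c with
          | true => simp [pvG2, List.contains_iff_mem.mp hdc]
          | false =>
            have hrm : c ∈ r := by rw [hdc] at hmem; simpa using hmem
            simp [pvG2, (hr c hrm).2]
        have e3 : pvG3 pain des r c = r := by
          cases hrc : r.contains c with
          | true => simp [pvG3, List.contains_iff_mem.mp hrc]
          | false =>
            have hdm : c ∈ d := by rw [hrc] at hmem; simpa using hmem
            simp [pvG3, (hd c hdm).2]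
        rw [hstep, e2, e3, ih p d r seen hseen hd hr]
        simp
      | false =>
        have hs' : List.contains seen c = false := hs
        have hsm : c ∉ seen := fun h => by rw [List.contains_iff_mem.mpr h] at hs'; simp at hs'
        have hdm : c ∉ d := fun h => by
          have h0 := hseen c
          rw [hs', List.contains_iff_mem.mpr h] at h0
          simp at h0
        have hrm : c ∉ r := fun h => by
          have h0 := hseen c
          rw [hs', List.contains_iff_mem.mpr h] at h0
          simp at h0
        have hadd : PySem.Set.add seen c = seen ++ [c] := by
          simp [PySem.Set.add, hsm]
        cases hdes : des c with
        | true =>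
          have hstep : pvStepB pain des (p, d, r, seen) c = (p, d ++ [c], r, seen ++ [c]) := by
            simp [pvStepB, hp, hsm, hdes, hadd]
          have e2 : pvG2 pain des d c = d ++ [c] := by simp [pvG2, hp, hdm, hdes]
          have e3 : pvG3 pain des r c = r := by simp [pvG3, hdes]
          have hseen2 : ∀ x : String, (seen ++ [c]).contains x = ((d ++ [c]).contains x || r.contains x) := by
            intro x
            simp only [List.contains_append, hseen]
            cases d.contains x <;> cases r.contains x <;> cases ([c] : List String).contains x <;> simp
          have hd2 : ∀ x ∈ d ++ [c], pain x = false ∧ des x = true := by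
            intro x hx
            rcases List.mem_append.mp hx with h | h
            · exact hd x h
            · simp only [List.mem_singleton] at h; subst h; exact ⟨hp, hdes⟩
          rw [hstep, e2, e3, ih p (d ++ [c]) r (seen ++ [c]) hseen2 hd2 hr]
          simp [hp]
        | false =>
          have hstep : pvStepB pain des (p, d, r, seen) c = (p, d, r ++ [c], seen ++ [c]) := by
            simp [pvStepB, hp, hsm, hdes, hadd]
          have e2 : pvG2 pain des d c = d := by simp [pvG2, hdes]
          have e3 : pvG3 pain des r c = r ++ [c] := by simp [pvG3, hp, hdes, hrm]
          have hseen2 : ∀ x : String, (seen ++ [c]).contains x = (d.contains x || (r ++ [c]).contains x) := by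
            intro x
            simp only [List.contains_append, hseen]
            cases d.contains x <;> cases r.contains x <;> cases ([c] : List String).contains x <;> simp
          have hr2 : ∀ x ∈ r ++ [c], pain x = false ∧ des x = false := by
            intro x hx
            rcases List.mem_append.mp hx with h | h
            · exact hr x h
            · simp only [List.mem_singleton] at h; subst h; exact ⟨hp, hdes⟩
          rw [hstep, e2, e3, ih p d (r ++ [c]) (seen ++ [c]) hseen2 hd hr2]
          simp [hp]

-- the whole pipeline, abstracted: A's three scans equal B's one-pass dispatch
theorem pv_master (pain des painB desB : String → Bool)
    (hpB : ∀ c, painB c = pain c) (hdB : ∀ c, desB c = des c) (concepts : List String) :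
    concepts.foldl (fun acc c => if !acc.contains c then acc ++ [c] else acc)
      (concepts.foldl (fun acc c => if !acc.contains c && des c then acc ++ [c] else acc)
        (concepts.foldl (fun acc c => if pain c then acc ++ [c] else acc) []))
    = (concepts.foldl (fun (s : List String × List String × List String × PySem.Set String) c =>
        match s with
        | (pains, desires, rest, seen) =>
          if painB c then (pains ++ [c], desires, rest, seen)
          else if !(PySem.Set.contains seen c) then
            let seen := PySem.Set.add seen c
            if desB c then (pains, desires ++ [c], rest, seen)
            else (pains, desires, rest ++ [c], seen)
          else (pains, desires, rest, seen)) ([], [], [], PySem.Set.empty)).1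
      ++ (concepts.foldl (fun (s : List String × List String × List String × PySem.Set String) c =>
        match s with
        | (pains, desires, rest, seen) =>
          if painB c then (pains ++ [c], desires, rest, seen)
          else if !(PySem.Set.contains seen c) then
            let seen := PySem.Set.add seen c
            if desB c then (pains, desires ++ [c], rest, seen)
            else (pains, desires, rest ++ [c], seen)
          else (pains, desires, rest, seen)) ([], [], [], PySem.Set.empty)).2.1
      ++ (concepts.foldl (fun (s : List String × List String × List String × PySem.Set String) c =>
        match s with
        | (pains, desires, rest, seen) =>
          if painB c then (pains ++ [c], desires, rest, seen)
          else if !(PySem.Set.contains seen c) then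
            let seen := PySem.Set.add seen c
            if desB c then (pains, desires ++ [c], rest, seen)
            else (pains, desires, rest ++ [c], seen)
          else (pains, desires, rest, seen)) ([], [], [], PySem.Set.empty)).2.2.1 := by
  have hfun : (fun (s : List String × List String × List String × PySem.Set String) c =>
        match s with
        | (pains, desires, rest, seen) =>
          if painB c then (pains ++ [c], desires, rest, seen)
          else if !(PySem.Set.contains seen c) then
            let seen := PySem.Set.add seen c
            if desB c then (pains, desires ++ [c], rest, seen)
            else (pains, desires, rest ++ [c], seen)
          else (pains, desires, rest, seen)) = pvStepB pain des := by
    funext s c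
    rcases s with ⟨a, b, e, f⟩
    simp only [pvStepB, hpB, hdB]
  have hA1 : concepts.foldl (fun acc c => if pain c then acc ++ [c] else acc) []
      = concepts.filter pain := by
    simpa using PySem.List.foldl_append_if_eq_filter pain concepts []
  have hA2 := pv_split2 pain des concepts (concepts.filter pain) []
    (pv_filter_contains pain concepts)
  rw [List.append_nil] at hA2
  have hQ : ∀ c ∈ concepts,
      (concepts.filter pain ++ concepts.foldl (pvG2 pain des) []).contains c = (pain c || des c) := by
    intro c hc
    rw [List.contains_append, pv_filter_contains pain concepts c hc, pv_g2_contains]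
    have hm : concepts.contains c = true := List.contains_iff_mem.mpr hc
    cases pain c <;> cases des c <;> simp [hc]
  have hA3 := pv_split3 pain des concepts
    (concepts.filter pain ++ concepts.foldl (pvG2 pain des) []) [] hQ
  rw [List.append_nil] at hA3
  have hB := pv_Binv pain des concepts [] [] [] PySem.Set.empty
    (by intro c; rfl) (by intro c h; simp at h) (by intro c h; simp at h)
  simp only [hfun]
  rw [hA1, hA2, hA3, hB]
  simp [List.append_assoc]

-- ===== VERDICT (by name: the statement is the Claim_ definition above) =====
theorem prioritize_concepts_py_spec : Claim_equal_prioritize_concepts_py := by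
  intro concepts avatar_data _
  unfold Spec_prioritize_concepts_py prioritize_concepts_py prioritize_concepts_py_alt
  exact pv_master
    (fun c => (PySem.Dict.getD (PySem.Dict.mk avatar_data) "dores_viscerais" []).any
      (fun dor => PySem.Str.isIn (PySem.Str.lower c) (PySem.Str.lower dor)))
    (fun c => (PySem.Dict.getD (PySem.Dict.mk avatar_data) "desejos_secretos" []).any
      (fun de => PySem.Str.isIn (PySem.Str.lower c) (PySem.Str.lower de)))
    (fun c => ((PySem.Dict.getD (PySem.Dict.mk avatar_data) "dores_viscerais" []).map PySem.Str.lower).any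
      (fun dor => PySem.Str.isIn (PySem.Str.lower c) dor))
    (fun c => ((PySem.Dict.getD (PySem.Dict.mk avatar_data) "desejos_secretos" []).map PySem.Str.lower).any
      (fun de => PySem.Str.isIn (PySem.Str.lower c) de))
    (fun c => by simp only [List.any_map]; rfl)
    (fun c => by simp only [List.any_map]; rfl)
    concepts
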